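-- pv_equiv track=rewrite | github.com/MariamAbdellah/DSP-Task-Repo2-Public | task1.py | add_signals
-- ===== SOURCE A (Python) =====
-- def add_signals(signal1, signal2):
--     # Extract indices and values from the signal lists
--     signal1_indices, signal1_values = signal1
--     signal2_indices, signal2_values = signal2
--
--     # Create a set of all unique indices from both signals
--     all_indices = sorted(set(signal1_indices) | set(signal2_indices))
--
--     addition_result = [0] * len(all_indices)
--
--     for i, index in enumerate(all_indices):
--         value1 = signal1_values[signal1_indices.index(index)] if index in signal1_indices else 0
--         value2 = signal2_values[signal2_indices.index(index)] if index in signal2_indices else 0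
--         addition_result[i] = value1 + value2
--     return all_indices, addition_result
-- ===== SOURCE B (Python) =====
-- def add_signals(signal1, signal2):
--     # Build, per signal, a dict keeping the FIRST value seen for each index,
--     # then merge the two key-sorted pair lists with two cursors.
--     def pairs(sig):
--         idxs, vals = sig
--         seen = {}
--         for i, v in zip(idxs, vals):
--             if i not in seen:
--                 seen[i] = v
--         return sorted(seen.items(), key=lambda p: p[0])
--
--     a = pairs(signal1)
--     b = pairs(signal2)
--     out_i = []
--     out_v = []
--     ia = ib = 0
--     while ia < len(a) and ib < len(b):
--         if a[ia][0] < b[ib][0]: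
--             out_i.append(a[ia][0]); out_v.append(a[ia][1]); ia += 1
--         elif b[ib][0] < a[ia][0]:
--             out_i.append(b[ib][0]); out_v.append(b[ib][1]); ib += 1
--         else:
--             out_i.append(a[ia][0]); out_v.append(a[ia][1] + b[ib][1]); ia += 1; ib += 1
--     while ia < len(a):
--         out_i.append(a[ia][0]); out_v.append(a[ia][1]); ia += 1
--     while ib < len(b):
--         out_i.append(b[ib][0]); out_v.append(b[ib][1]); ib += 1
--     return out_i, out_v
-- ===== Notes on version B (the rewrite author's own statement) =====
-- stated objective: faster
-- what changed: Replaces A's per-unique-index linear membership tests and .index() scans with one first-wins dict pass per signal followed by a two-cursor merge of the two key-sorted pair lists.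
import Mathlib
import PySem

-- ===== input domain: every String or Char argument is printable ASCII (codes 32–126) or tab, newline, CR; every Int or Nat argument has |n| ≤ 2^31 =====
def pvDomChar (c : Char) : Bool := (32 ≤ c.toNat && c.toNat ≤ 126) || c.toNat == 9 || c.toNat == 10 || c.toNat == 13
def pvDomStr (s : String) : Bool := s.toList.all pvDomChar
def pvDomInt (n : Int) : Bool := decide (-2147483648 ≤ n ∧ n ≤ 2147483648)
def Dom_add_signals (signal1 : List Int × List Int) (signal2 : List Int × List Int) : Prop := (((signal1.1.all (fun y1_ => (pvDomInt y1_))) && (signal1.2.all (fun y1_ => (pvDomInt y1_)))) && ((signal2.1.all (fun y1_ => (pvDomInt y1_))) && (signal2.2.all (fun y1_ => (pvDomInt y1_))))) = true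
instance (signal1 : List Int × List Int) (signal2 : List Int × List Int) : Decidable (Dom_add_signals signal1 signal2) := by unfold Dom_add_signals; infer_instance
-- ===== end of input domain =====

-- B replaces A's per-index .index() scans with a first-wins dict per signal and a
-- two-cursor merge of the two key-sorted pair lists (faster).

-- ===== PORT A =====
def add_signals (signal1 : List Int × List Int) (signal2 : List Int × List Int) : List Int × List Int :=
  let signal1_indices := signal1.1; let signal1_values := signal1.2
  let signal2_indices := signal2.1; let signal2_values := signal2.2
  let all_indices := PySem.List.sorted (PySem.Set.union (PySem.Set.ofList signal1_indices) (PySem.Set.ofList signal2_indices)) (fun x => x) false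
  let addition_result := List.replicate all_indices.length (0 : Int)
  -- for i, index in enumerate(all_indices): addition_result[i] = value1 + value2
  -- (pyGetD/getD defaults are only reached where the Python raises IndexError; Pre_ excludes those inputs)
  let addition_result := (PySem.List.enumerate all_indices 0).foldl (fun acc p =>
      let value1 : Int := if signal1_indices.contains p.2 then
          PySem.List.pyGetD signal1_values (((PySem.List.index? signal1_indices p.2).getD 0 : Nat) : Int) 0 else 0
      let value2 : Int := if signal2_indices.contains p.2 then
          PySem.List.pyGetD signal2_values (((PySem.List.index? signal2_indices p.2).getD 0 : Nat) : Int) 0 else 0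
      PySem.List.pySetD acc p.1 (value1 + value2)) addition_result
  (all_indices, addition_result)

-- ===== PORT B =====
-- first-wins dict over zip(idxs, vals)
def pvFirstWins (idxs vals : List Int) : PySem.Dict Int Int :=
  (idxs.zip vals).foldl (fun d p => if d.contains p.1 then d else d.insert p.1 p.2) PySem.Dict.empty

-- sorted(seen.items(), key=lambda p: p[0])
def pvPairs (sig : List Int × List Int) : List (Int × Int) :=
  PySem.List.sorted (pvFirstWins sig.1 sig.2).items (fun p => p.1) false

-- the two-cursor merge loops of Source B, as structural recursion on the two lists
def pvMerge : List (Int × Int) → List (Int × Int) → List Int × List Int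
  | [], bs => (bs.map (·.1), bs.map (·.2))
  | a :: as_, [] => ((a :: as_).map (·.1), (a :: as_).map (·.2))
  | (ka, va) :: as_, (kb, vb) :: bs =>
    if ka < kb then
      let r := pvMerge as_ ((kb, vb) :: bs); (ka :: r.1, va :: r.2)
    else if kb < ka then
      let r := pvMerge ((ka, va) :: as_) bs; (kb :: r.1, vb :: r.2)
    else
      let r := pvMerge as_ bs; (ka :: r.1, (va + vb) :: r.2)
termination_by as_ bs => as_.length + bs.length

def add_signals_alt (signal1 : List Int × List Int) (signal2 : List Int × List Int) : List Int × List Int :=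
  pvMerge (pvPairs signal1) (pvPairs signal2)

-- ===== PRECONDITION & SPEC =====
-- Pre_ excludes exactly the inputs where A raises IndexError: some index occurs in a
-- signal's index list but its first occurrence lies beyond the end of the value list.
def Pre_add_signals (signal1 : List Int × List Int) (signal2 : List Int × List Int) : Prop :=
  (∀ x ∈ signal1.1, signal1.1.idxOf x < signal1.2.length) ∧
  (∀ x ∈ signal2.1, signal2.1.idxOf x < signal2.2.length)
instance (signal1 : List Int × List Int) (signal2 : List Int × List Int) : Decidable (Pre_add_signals signal1 signal2) := by unfold Pre_add_signals; infer_instance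
def pvWitness_add_signals : (List Int × List Int) × (List Int × List Int) := (([0, 2], [5, 7]), ([1, 2], [3, 4]))
def Spec_add_signals (signal1 : List Int × List Int) (signal2 : List Int × List Int) (out : List Int × List Int) : Prop := out = add_signals_alt signal1 signal2
instance (signal1 : List Int × List Int) (signal2 : List Int × List Int) (out : List Int × List Int) : Decidable (Spec_add_signals signal1 signal2 out) := by unfold Spec_add_signals; infer_instance

-- ===== CLAIM (what is proved, stated in full; the proofs are below) =====
def Claim_equal_add_signals : Prop := ∀ (signal1 : List Int × List Int) (signal2 : List Int × List Int), Dom_add_signals signal1 signal2 → Pre_add_signals signal1 signal2 → Spec_add_signals signal1 signal2 (add_signals signal1 signal2)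

-- ===== LEMMAS AND PROOFS =====

-- lookup used to characterise both sides
def pvLook (L : List (Int × Int)) (k : Int) : Int :=
  ((L.find? (fun p => p.1 == k)).map (·.2)).getD 0

theorem pvLook_nil (k : Int) : pvLook [] k = 0 := rfl

theorem pvLook_cons (p : Int × Int) (L : List (Int × Int)) (k : Int) :
    pvLook (p :: L) k = if p.1 = k then p.2 else pvLook L k := by
  by_cases h : p.1 = k <;> simp [pvLook, h]

theorem pvLook_not_mem {L : List (Int × Int)} {k : Int} (h : k ∉ L.map (·.1)) :
    pvLook L k = 0 := by
  induction L with
  | nil => rfl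
  | cons p t ih =>
    simp only [List.map_cons, List.mem_cons, not_or] at h
    rw [pvLook_cons, if_neg (fun he => h.1 he.symm), ih h.2]

theorem pvLook_mem {L : List (Int × Int)} {k v : Int}
    (hs : L.Pairwise (fun p q => p.1 < q.1)) (h : (k, v) ∈ L) :
    pvLook L k = v := by
  induction L with
  | nil => simp at h
  | cons p t ih =>
    rcases List.mem_cons.mp h with h | h
    · rw [← h, pvLook_cons, if_pos rfl]
    · have hk : p.1 < k := by
        have := (List.pairwise_cons.mp hs).1 _ h; simpa using this
      rw [pvLook_cons, if_neg (by omega), ih (List.pairwise_cons.mp hs).2 h]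

-- === the dict built by pvFirstWins ===
theorem firstWins_get? (ps : List (Int × Int)) (d : PySem.Dict Int Int) (k : Int) :
    ((ps.foldl (fun d p => if d.contains p.1 then d else d.insert p.1 p.2) d).get? k)
      = ((d.get? k).orElse (fun _ => (ps.find? (fun p => p.1 == k)).map (·.2))) := by
  induction ps generalizing d with
  | nil => cases h : d.get? k <;> simp [Option.orElse, h]
  | cons p t ih =>
    simp only [List.foldl_cons, ih]
    by_cases hc : d.contains p.1 = true
    · rw [if_pos hc]
      by_cases he : p.1 = k
      · have hs : (d.get? k).isSome := by
          rw [← PySem.Dict.contains_eq_isSome_get?, ← he]; exact hc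
        cases h : d.get? k with
        | none => rw [h] at hs; simp at hs
        | some v => rfl
      · simp [Option.orElse, he]
    · rw [if_neg hc]
      have hn : d.get? p.1 = none := by
        rw [PySem.Dict.get?_eq_none_iff_contains]; simpa using hc
      by_cases he : p.1 = k
      · subst he
        simp [Option.orElse, hn]
      · have he' : ¬ k = p.1 := fun h => he h.symm
        simp [PySem.Dict.get?_insert, Option.orElse, he, he']

theorem firstWins_keys (ps : List (Int × Int)) (d : PySem.Dict Int Int) :
    (ps.foldl (fun d p => if d.contains p.1 then d else d.insert p.1 p.2) d).keys
      = PySem.Set.update d.keys (ps.map (·.1)) := by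
  induction ps generalizing d with
  | nil => simp [PySem.Set.update]
  | cons p t ih =>
    simp only [List.foldl_cons, List.map_cons, PySem.Set.update_cons, ih]
    congr 1
    by_cases hc : d.contains p.1 = true
    · rw [if_pos hc, PySem.Set.add, if_pos]
      simpa [PySem.Set.contains_iff, ← PySem.Dict.contains_iff_mem_keys] using hc
    · rw [if_neg hc, PySem.Dict.keys_insert_of_not_contains (h := by simpa using hc),
        PySem.Set.add, if_neg]
      simpa [PySem.Set.contains_iff, ← PySem.Dict.contains_iff_mem_keys] using hc

-- === the merge ===
theorem pvMap_self (bs : List (Int × Int)) (hb : bs.Pairwise (fun p q => p.1 < q.1)) :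
    bs.map (·.2) = (bs.map (·.1)).map (fun k => pvLook bs k) := by
  induction bs with
  | nil => rfl
  | cons p t ih =>
    obtain ⟨h1, h2⟩ := List.pairwise_cons.mp hb
    simp only [List.map_cons, List.cons.injEq]
    refine ⟨(by rw [pvLook_cons, if_pos rfl]), ?_⟩
    rw [ih h2]
    apply List.map_congr_left
    intro k hk
    obtain ⟨q, hq, rfl⟩ := List.mem_map.mp hk
    rw [pvLook_cons, if_neg (by have := h1 q hq; omega)]

theorem pvMerge_spec (as_ bs : List (Int × Int))
    (ha : as_.Pairwise (fun p q => p.1 < q.1)) (hb : bs.Pairwise (fun p q => p.1 < q.1)) :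
    (pvMerge as_ bs).1.Pairwise (· < ·) ∧
    (∀ k, k ∈ (pvMerge as_ bs).1 ↔ k ∈ as_.map (·.1) ∨ k ∈ bs.map (·.1)) ∧
    (pvMerge as_ bs).2 = (pvMerge as_ bs).1.map (fun k => pvLook as_ k + pvLook bs k) := by
  fun_induction pvMerge as_ bs with
  | case1 bs =>
    refine ⟨by simpa [List.pairwise_map] using hb, by simp, ?_⟩
    rw [pvMap_self bs hb]
    apply List.map_congr_left
    intro k _
    simp [pvLook_nil]
  | case2 a as_ =>
    refine ⟨by simpa [List.pairwise_map] using ha, by simp, ?_⟩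
    rw [pvMap_self _ ha]
    apply List.map_congr_left
    intro k _
    simp [pvLook_nil]
  | case3 ka va as_ kb vb bs h r ih =>
    obtain ⟨ha1, ha2⟩ := List.pairwise_cons.mp ha
    obtain ⟨ih1, ih2, ih3⟩ := ih ha2 hb
    have hr1 : r.1 = (pvMerge as_ ((kb, vb) :: bs)).1 := rfl
    have hr2 : r.2 = (pvMerge as_ ((kb, vb) :: bs)).2 := rfl
    have hmem : ∀ k ∈ (pvMerge as_ ((kb, vb) :: bs)).1, ka < k := by
      intro k hk
      rcases (ih2 k).mp hk with hk | hk
      · obtain ⟨q, hq, rfl⟩ := List.mem_map.mp hk; exact ha1 q hq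
      · simp only [List.map_cons, List.mem_cons] at hk
        rcases hk with rfl | hk
        · exact h
        · obtain ⟨q, hq, rfl⟩ := List.mem_map.mp hk
          have := (List.pairwise_cons.mp hb).1 q hq
          omega
    simp only [hr1, hr2]
    refine ⟨List.pairwise_cons.mpr ⟨hmem, ih1⟩, ?_, ?_⟩
    · intro k
      simp only [List.mem_cons, ih2, List.map_cons]
      tauto
    · simp only [List.map_cons, List.cons.injEq]
      constructor
      · rw [pvLook_cons (p := (ka, va)), if_pos rfl,
          pvLook_not_mem (L := (kb, vb) :: bs), add_zero]
        intro hk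
        simp only [List.map_cons, List.mem_cons] at hk
        rcases hk with rfl | hk
        · omega
        · obtain ⟨q, hq, rfl⟩ := List.mem_map.mp hk
          have := (List.pairwise_cons.mp hb).1 q hq
          omega
      · rw [ih3]
        apply List.map_congr_left
        intro k hk
        rw [pvLook_cons (p := (ka, va)),
          if_neg (show ¬ ka = k by have := hmem k hk; omega)]
  | case4 ka va as_ kb vb bs h h2 r ih =>
    obtain ⟨hb1, hb2⟩ := List.pairwise_cons.mp hb
    obtain ⟨ih1, ih2, ih3⟩ := ih ha hb2
    have hr1 : r.1 = (pvMerge ((ka, va) :: as_) bs).1 := rfl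
    have hr2 : r.2 = (pvMerge ((ka, va) :: as_) bs).2 := rfl
    have hmem : ∀ k ∈ (pvMerge ((ka, va) :: as_) bs).1, kb < k := by
      intro k hk
      rcases (ih2 k).mp hk with hk | hk
      · simp only [List.map_cons, List.mem_cons] at hk
        rcases hk with rfl | hk
        · exact h2
        · obtain ⟨q, hq, rfl⟩ := List.mem_map.mp hk
          have := (List.pairwise_cons.mp ha).1 q hq
          omega
      · obtain ⟨q, hq, rfl⟩ := List.mem_map.mp hk; exact hb1 q hq
    simp only [hr1, hr2]
    refine ⟨List.pairwise_cons.mpr ⟨hmem, ih1⟩, ?_, ?_⟩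
    · intro k
      simp only [List.mem_cons, ih2, List.map_cons]
      tauto
    · simp only [List.map_cons, List.cons.injEq]
      constructor
      · rw [pvLook_cons (p := (kb, vb)), if_pos rfl,
          pvLook_not_mem (L := (ka, va) :: as_), zero_add]
        intro hk
        simp only [List.map_cons, List.mem_cons] at hk
        rcases hk with rfl | hk
        · omega
        · obtain ⟨q, hq, rfl⟩ := List.mem_map.mp hk
          have := (List.pairwise_cons.mp ha).1 q hq
          omega
      · rw [ih3]
        apply List.map_congr_left
        intro k hk
        rw [pvLook_cons (p := (kb, vb)),
          if_neg (show ¬ kb = k by have := hmem k hk; omega)]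
  | case5 ka va as_ kb vb bs h h2 r ih =>
    have heq : ka = kb := by omega
    obtain ⟨ha1, ha2⟩ := List.pairwise_cons.mp ha
    obtain ⟨hb1, hb2⟩ := List.pairwise_cons.mp hb
    obtain ⟨ih1, ih2, ih3⟩ := ih ha2 hb2
    have hr1 : r.1 = (pvMerge as_ bs).1 := rfl
    have hr2 : r.2 = (pvMerge as_ bs).2 := rfl
    have hmem : ∀ k ∈ (pvMerge as_ bs).1, ka < k := by
      intro k hk
      rcases (ih2 k).mp hk with hk | hk
      · obtain ⟨q, hq, rfl⟩ := List.mem_map.mp hk; exact ha1 q hq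
      · obtain ⟨q, hq, rfl⟩ := List.mem_map.mp hk
        have := hb1 q hq
        omega
    simp only [hr1, hr2]
    refine ⟨List.pairwise_cons.mpr ⟨hmem, ih1⟩, ?_, ?_⟩
    · intro k
      simp only [List.mem_cons, ih2, List.map_cons]
      constructor
      · rintro (rfl | hk)
        · exact Or.inl (Or.inl rfl)
        · tauto
      · rintro ((rfl | hk) | (rfl | hk))
        · exact Or.inl rfl
        · exact Or.inr (Or.inl hk)
        · exact Or.inl heq.symm
        · exact Or.inr (Or.inr hk)
    · simp only [List.map_cons, List.cons.injEq]
      constructor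
      · rw [pvLook_cons (p := (ka, va)), if_pos rfl,
          pvLook_cons (p := (kb, vb)), if_pos heq.symm]
      · rw [ih3]
        apply List.map_congr_left
        intro k hk
        rw [pvLook_cons (p := (ka, va)),
          if_neg (show ¬ ka = k by have := hmem k hk; omega),
          pvLook_cons (p := (kb, vb)),
          if_neg (show ¬ kb = k by have := hmem k hk; omega)]

-- === A's write loop is a map ===
theorem pvSetAppendLen (pref : List Int) (y v : Int) (t : List Int) :
    (pref ++ y :: t).set pref.length v = pref ++ v :: t := by
  induction pref with
  | nil => rfl
  | cons a p ih => simp [ih]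

theorem pvLoopSet (f : Int → Int) (l pref : List Int) :
    (PySem.List.enumerate l (pref.length : Int)).foldl
        (fun acc p => PySem.List.pySetD acc p.1 (f p.2))
        (pref ++ List.replicate l.length 0)
      = pref ++ l.map f := by
  induction l generalizing pref with
  | nil => simp [PySem.List.enumerate_nil]
  | cons x xs ih =>
    rw [PySem.List.enumerate_cons, List.foldl_cons]
    have h1 : PySem.List.pySetD (pref ++ List.replicate (x :: xs).length 0)
        (pref.length : Int) (f x) = (pref ++ [f x]) ++ List.replicate xs.length 0 := by
      rw [PySem.List.pySetD_natCast]
      simp only [List.length_cons, List.replicate_succ]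
      rw [pvSetAppendLen]
      simp
    rw [h1]
    have h2 : ((pref.length : Int) + 1) = (((pref ++ [f x]).length : Nat) : Int) := by
      simp
    rw [h2, ih (pref ++ [f x])]
    simp

-- === the first occurrence in zip(idxs, vals) ===
theorem pvZipFind (idxs : List Int) (x : Int) :
    ∀ (vals : List Int), x ∈ idxs → idxs.idxOf x < vals.length →
    (idxs.zip vals).find? (fun p => p.1 == x) = some (x, vals.getD (idxs.idxOf x) 0) := by
  induction idxs with
  | nil => intro vals hx; simp at hx
  | cons i is ih =>
    intro vals hx hlt
    cases vals with
    | nil => simp at hlt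
    | cons v vs =>
      by_cases he : i = x
      · subst he
        simp [List.idxOf_cons_self]
      · have hx' : x ∈ is := by
          rcases List.mem_cons.mp hx with h | h
          · exact absurd h.symm he
          · exact h
        have hidx : (i :: is).idxOf x = is.idxOf x + 1 := List.idxOf_cons_ne _ he
        rw [hidx] at hlt
        simp only [List.zip_cons_cons, List.find?_cons,
          show (i == x) = false from beq_eq_false_iff_ne.mpr he, hidx]
        rw [List.getD_cons_succ]
        exact ih vs hx' (by simpa using hlt)

-- === per-signal facts ===
theorem pvPairs_pairwise (sig : List Int × List Int) :
    (pvPairs sig).Pairwise (fun p q => p.1 < q.1) := by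
  have hkeys : (pvFirstWins sig.1 sig.2).keys
      = PySem.Set.ofList ((sig.1.zip sig.2).map (·.1)) := by
    rw [pvFirstWins, firstWins_keys]
    simp [PySem.Set.update_nil_left, PySem.Dict.keys_empty]
  have hnd : ((pvPairs sig).map (·.1)).Nodup := by
    have hperm : (pvPairs sig).Perm (pvFirstWins sig.1 sig.2).items :=
      PySem.List.sorted_perm _ _ _
    have : ((pvFirstWins sig.1 sig.2).items.map (·.1)).Nodup := by
      have : ((pvFirstWins sig.1 sig.2).keys).Nodup := by
        rw [hkeys]; exact PySem.Set.nodup_ofList _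
      simpa [PySem.Dict.keys] using this
    exact ((hperm.map (·.1)).nodup_iff).mpr this
  have hle : (pvPairs sig).Pairwise (fun p q => p.1 ≤ q.1) :=
    PySem.List.sorted_pairwise _ _
  have hne : (pvPairs sig).Pairwise (fun p q => p.1 ≠ q.1) :=
    List.pairwise_map.mp hnd
  exact (hle.and hne).imp (fun h => lt_of_le_of_ne h.1 h.2)

theorem pvMemKeys (sig : List Int × List Int)
    (hpre : ∀ x ∈ sig.1, sig.1.idxOf x < sig.2.length) (k : Int) :
    k ∈ (pvPairs sig).map (·.1) ↔ k ∈ sig.1 := by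
  have hperm : ((pvPairs sig).map (·.1)).Perm ((pvFirstWins sig.1 sig.2).items.map (·.1)) :=
    (PySem.List.sorted_perm _ _ _).map _
  rw [hperm.mem_iff]
  have hkeys : (pvFirstWins sig.1 sig.2).items.map (·.1)
      = PySem.Set.ofList ((sig.1.zip sig.2).map (·.1)) := by
    have := firstWins_keys (sig.1.zip sig.2) PySem.Dict.empty
    rw [pvFirstWins]
    simpa [PySem.Set.update_nil_left, PySem.Dict.keys_empty, PySem.Dict.keys] using this
  rw [hkeys, PySem.Set.mem_ofList]
  constructor
  · intro h
    obtain ⟨p, hp, rfl⟩ := List.mem_map.mp h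
    exact (List.of_mem_zip hp).1
  · intro h
    have hf := pvZipFind sig.1 k sig.2 h (hpre k h)
    have hm : (k, sig.2.getD (sig.1.idxOf k) 0) ∈ sig.1.zip sig.2 :=
      List.mem_of_find?_eq_some hf
    exact List.mem_map.mpr ⟨_, hm, rfl⟩

theorem pvLookPairs (sig : List Int × List Int)
    (hpre : ∀ x ∈ sig.1, sig.1.idxOf x < sig.2.length) (k : Int) :
    pvLook (pvPairs sig) k
      = if k ∈ sig.1 then sig.2.getD (sig.1.idxOf k) 0 else 0 := by
  by_cases h : k ∈ sig.1
  · rw [if_pos h]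
    have hget : (pvFirstWins sig.1 sig.2).get? k
        = some (sig.2.getD (sig.1.idxOf k) 0) := by
      rw [pvFirstWins, firstWins_get?, PySem.Dict.get?_empty,
        pvZipFind sig.1 k sig.2 h (hpre k h)]
      rfl
    have hmem : (k, sig.2.getD (sig.1.idxOf k) 0) ∈ pvPairs sig := by
      rw [pvPairs, PySem.List.mem_sorted]
      exact PySem.Dict.mem_items_of_get?_eq_some _ hget
    exact pvLook_mem (pvPairs_pairwise sig) hmem
  · rw [if_neg h]
    exact pvLook_not_mem (fun hm => h ((pvMemKeys sig hpre k).mp hm))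

-- idxOf? agrees with idxOf on members
theorem pvIndex?_mem {l : List Int} {x : Int} (h : x ∈ l) :
    PySem.List.index? l x = some (l.idxOf x) := by
  induction l with
  | nil => simp at h
  | cons a t ih =>
    by_cases he : a = x
    · subst he
      rw [PySem.List.index?_cons_self, List.idxOf_cons_self]
    · have hx : x ∈ t := by
        rcases List.mem_cons.mp h with hh | hh
        · exact absurd hh.symm he
        · exact hh
      rw [PySem.List.index?_cons_of_ne _ he, ih hx, List.idxOf_cons_ne _ he]
      rfl

-- ===== VERDICT (by name: the statement is the Claim_ definition above) =====
theorem add_signals_spec : Claim_equal_add_signals := by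
  intro s1 s2 _ hpre
  show add_signals s1 s2 = add_signals_alt s1 s2
  obtain ⟨hp1, hp2⟩ := hpre
  -- B's shape from the merge lemma
  have hP1 := pvPairs_pairwise s1
  have hP2 := pvPairs_pairwise s2
  obtain ⟨hK1, hK2, hK3⟩ := pvMerge_spec (pvPairs s1) (pvPairs s2) hP1 hP2
  set K := (pvMerge (pvPairs s1) (pvPairs s2)).1 with hKdef
  -- A's index list equals K
  have hall : PySem.List.sorted
      (PySem.Set.union (PySem.Set.ofList s1.1) (PySem.Set.ofList s2.1)) (fun x => x) false = K := by
    apply PySem.List.sorted_eq_of_perm_of_pairwise_lt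
    · apply (List.perm_ext_iff_of_nodup (hK1.imp ne_of_lt)
        (PySem.Set.nodup_union _ _ (PySem.Set.nodup_ofList _))).mpr
      intro k
      rw [hKdef, hK2 k, pvMemKeys s1 hp1 k, pvMemKeys s2 hp2 k,
        PySem.Set.mem_union, PySem.Set.mem_ofList, PySem.Set.mem_ofList]
    · exact hK1
  -- the per-index value A computes
  have hval : ∀ k ∈ K,
      (if s1.1.contains k then
          PySem.List.pyGetD s1.2 (((PySem.List.index? s1.1 k).getD 0 : Nat) : Int) 0 else 0)
        + (if s2.1.contains k then
          PySem.List.pyGetD s2.2 (((PySem.List.index? s2.1 k).getD 0 : Nat) : Int) 0 else 0)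
      = pvLook (pvPairs s1) k + pvLook (pvPairs s2) k := by
    intro k _
    have side : ∀ (sig : List Int × List Int),
        (∀ x ∈ sig.1, sig.1.idxOf x < sig.2.length) →
        (if sig.1.contains k then
            PySem.List.pyGetD sig.2 (((PySem.List.index? sig.1 k).getD 0 : Nat) : Int) 0 else 0)
          = pvLook (pvPairs sig) k := by
      intro sig hp
      rw [pvLookPairs sig hp k]
      by_cases h : k ∈ sig.1
      · rw [if_pos (by simpa using h), if_pos h, pvIndex?_mem h]
        simp [PySem.List.pyGetD_natCast]
      · rw [if_neg (by simpa using h), if_neg h]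
    rw [side s1 hp1, side s2 hp2]
  -- assemble
  have hA : add_signals s1 s2
      = (PySem.List.sorted (PySem.Set.union (PySem.Set.ofList s1.1) (PySem.Set.ofList s2.1)) (fun x => x) false,
         (PySem.List.enumerate (PySem.List.sorted (PySem.Set.union (PySem.Set.ofList s1.1) (PySem.Set.ofList s2.1)) (fun x => x) false) 0).foldl
           (fun acc p => PySem.List.pySetD acc p.1
             ((if s1.1.contains p.2 then PySem.List.pyGetD s1.2 (((PySem.List.index? s1.1 p.2).getD 0 : Nat) : Int) 0 else 0)
              + (if s2.1.contains p.2 then PySem.List.pyGetD s2.2 (((PySem.List.index? s2.1 p.2).getD 0 : Nat) : Int) 0 else 0)))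
           (List.replicate (PySem.List.sorted (PySem.Set.union (PySem.Set.ofList s1.1) (PySem.Set.ofList s2.1)) (fun x => x) false).length (0 : Int))) := rfl
  rw [hA, hall]
  unfold add_signals_alt
  refine Prod.ext_iff.mpr ⟨hKdef, ?_⟩
  have hloop := pvLoopSet (fun x =>
      (if s1.1.contains x then
          PySem.List.pyGetD s1.2 (((PySem.List.index? s1.1 x).getD 0 : Nat) : Int) 0 else 0)
        + (if s2.1.contains x then
          PySem.List.pyGetD s2.2 (((PySem.List.index? s2.1 x).getD 0 : Nat) : Int) 0 else 0)) K []
  simp only [List.nil_append, List.length_nil, Nat.cast_zero] at hloop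
  exact hloop.trans (by rw [hK3]; exact List.map_congr_left hval)
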